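-- pv_equiv track=rewrite | github.com/yannickloth/W33-Theory | tests/test_ym_dirac_kahler_emergence.py | _build_simplices
-- ===== SOURCE A (Python) =====
-- def _build_simplices(n, adj):
--     adj_set = [set(adj[i]) for i in range(n)]
--     simplices = {0: [tuple([v]) for v in range(n)]}
--     edges = []
--     for i in range(n):
--         for j in adj[i]:
--             if j > i:
--                 edges.append((i, j))
--     simplices[1] = sorted(edges)
--
--     triangles = []
--     for i in range(n):
--         for j in adj[i]:
--             if j <= i:
--                 continue
--             for k_v in adj[j]:
--                 if k_v <= j:
--                     continue
--                 if k_v in adj_set[i]: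
--                     triangles.append((i, j, k_v))
--     simplices[2] = sorted(triangles)
--
--     tetrahedra = []
--     for i in range(n):
--         for j in adj[i]:
--             if j <= i:
--                 continue
--             common_ij = adj_set[i] & adj_set[j]
--             for k_v in common_ij:
--                 if k_v <= j:
--                     continue
--                 for l_v in common_ij & adj_set[k_v]:
--                     if l_v <= k_v:
--                         continue
--                     tetrahedra.append((i, j, k_v, l_v))
--     simplices[3] = sorted(tetrahedra)
--     return simplices
-- ===== SOURCE B (Python) =====
-- def _build_simplices(n, adj):
--     # One uniform recursive clique extension (DFS over forward neighbours in
--     # ascending order) instead of four separate unrolled loop nests + sorts.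
--     adj_set = [set(adj[i]) for i in range(n)]
--     fwd = [sorted(w for w in adj_set[i] if w > i) for i in range(n)]
--     levels = ([], [], [], [])
--
--     def extend(clique, cands):
--         levels[len(clique) - 1].append(clique)
--         if len(clique) == 4:
--             return
--         cset = set(cands)
--         for v in cands:
--             extend(clique + (v,), [w for w in fwd[v] if w in cset])
--
--     for v in range(n):
--         extend((v,), fwd[v])
--     return {d: lst for d, lst in enumerate(levels)}
-- ===== Notes on version B (the rewrite author's own statement) =====
-- stated objective: alternative
-- what changed: Replaces A's four separate loop nests (generate each dimension's simplices unsorted from list/set iteration, then sort each level) by one uniform recursive clique-extension DFS over precomputed sorted forward-neighbour lists, which emits every level already in lexicographic order so no sorting is needed.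
import Mathlib
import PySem

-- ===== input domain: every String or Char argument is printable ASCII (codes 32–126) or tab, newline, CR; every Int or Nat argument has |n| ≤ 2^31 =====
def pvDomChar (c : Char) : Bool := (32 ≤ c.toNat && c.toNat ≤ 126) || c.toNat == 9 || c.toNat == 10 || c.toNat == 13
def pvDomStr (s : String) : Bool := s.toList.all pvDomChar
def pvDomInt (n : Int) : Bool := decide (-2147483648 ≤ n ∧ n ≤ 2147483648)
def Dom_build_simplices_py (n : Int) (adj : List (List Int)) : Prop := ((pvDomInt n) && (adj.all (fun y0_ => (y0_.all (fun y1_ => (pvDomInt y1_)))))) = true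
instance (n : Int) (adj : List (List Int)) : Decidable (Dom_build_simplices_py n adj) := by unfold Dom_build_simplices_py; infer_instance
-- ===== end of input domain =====

-- B replaces A's four separate loop nests (generate each simplex dimension unsorted, then
-- sort each level) by one uniform recursive clique-extension DFS over precomputed sorted
-- forward-neighbour lists, emitting every level already in lexicographic order (no sorting).

-- ===== PORT A =====
def build_simplices_py (n : Int) (adj : List (List Int)) : List (Int × List (List Int)) :=
  let rng := PySem.List.pyRange 0 n 1
  let adjSet : List (PySem.Set Int) := rng.map (fun i => PySem.Set.ofList (PySem.List.pyGetD adj i []))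
  let s0 : List (List Int) := rng.map (fun v => [v])
  let edges : List (List Int) := rng.foldl (fun acc i =>
    (PySem.List.pyGetD adj i []).foldl (fun acc j =>
      if j > i then acc ++ [[i, j]] else acc) acc) []
  let triangles : List (List Int) := rng.foldl (fun acc i =>
    (PySem.List.pyGetD adj i []).foldl (fun acc j =>
      if j ≤ i then acc
      else (PySem.List.pyGetD adj j []).foldl (fun acc k =>
        if k ≤ j then acc
        else if PySem.Set.contains (PySem.List.pyGetD adjSet i []) k then acc ++ [[i, j, k]]
        else acc) acc) acc) []
  let tetrahedra : List (List Int) := rng.foldl (fun acc i =>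
    (PySem.List.pyGetD adj i []).foldl (fun acc j =>
      if j ≤ i then acc
      else
        let common := PySem.Set.inter (PySem.List.pyGetD adjSet i []) (PySem.List.pyGetD adjSet j [])
        common.foldl (fun acc k =>
          if k ≤ j then acc
          else (PySem.Set.inter common (PySem.List.pyGetD adjSet k [])).foldl (fun acc l =>
            if l ≤ k then acc else acc ++ [[i, j, k, l]]) acc) acc) acc) []
  ((((PySem.Dict.empty.insert 0 s0).insert 1
      (PySem.List.sorted edges (fun x => x) false)).insert 2
      (PySem.List.sorted triangles (fun x => x) false)).insert 3
      (PySem.List.sorted tetrahedra (fun x => x) false)).items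

-- ===== PORT B =====
-- B-side helper: levels[len(clique)-1].append(clique)
def pvPush (acc : List (List Int) × List (List Int) × List (List Int) × List (List Int))
    (d : Nat) (c : List Int) :
    List (List Int) × List (List Int) × List (List Int) × List (List Int) :=
  match d with
  | 0 => (acc.1 ++ [c], acc.2.1, acc.2.2.1, acc.2.2.2)
  | 1 => (acc.1, acc.2.1 ++ [c], acc.2.2.1, acc.2.2.2)
  | 2 => (acc.1, acc.2.1, acc.2.2.1 ++ [c], acc.2.2.2)
  | _ => (acc.1, acc.2.1, acc.2.2.1, acc.2.2.2 ++ [c])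

-- B-side helper: the recursive clique extension (fuel = 4 - len(clique), a termination measure only)
def pvExtend (fwd : List (List Int)) (fuel : Nat) (clique : List Int) (cands : List Int)
    (acc : List (List Int) × List (List Int) × List (List Int) × List (List Int)) :
    List (List Int) × List (List Int) × List (List Int) × List (List Int) :=
  let acc1 := pvPush acc (clique.length - 1) clique
  if clique.length == 4 then acc1
  else
    match fuel with
    | 0 => acc1
    | Nat.succ f =>
      let cset : PySem.Set Int := PySem.Set.ofList cands
      cands.foldl (fun a v =>
        pvExtend fwd f (clique ++ [v])
          ((PySem.List.pyGetD fwd v []).filter (fun w => PySem.Set.contains cset w)) a) acc1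

def build_simplices_py_alt (n : Int) (adj : List (List Int)) : List (Int × List (List Int)) :=
  let rng := PySem.List.pyRange 0 n 1
  let adjSet : List (PySem.Set Int) := rng.map (fun i => PySem.Set.ofList (PySem.List.pyGetD adj i []))
  let fwd : List (List Int) := rng.map (fun i =>
    PySem.List.sorted ((PySem.List.pyGetD adjSet i []).filter (fun w => i < w)) (fun x => x) false)
  let levels := rng.foldl (fun a v => pvExtend fwd 3 [v] (PySem.List.pyGetD fwd v []) a)
    ([], [], [], [])
  ((((PySem.Dict.empty.insert 0 levels.1).insert 1 levels.2.1).insert 2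
      levels.2.2.1).insert 3 levels.2.2.2).items

-- ===== PRECONDITION & SPEC =====
-- Pre_ excludes (a) inputs on which A raises an IndexError (n > len(adj), or a forward
-- adjacency entry j > i with j ≥ n, which A indexes into adj/adj_set), and (b) adjacency
-- rows whose forward entries (entries > the row's own index) contain duplicates, on which
-- A's duplicate multiplicities are an accident of its implementation (list-driven for
-- edges/triangles but set-deduplicated for tetrahedra).
def Pre_build_simplices_py (n : Int) (adj : List (List Int)) : Prop :=
  n ≤ (adj.length : Int) ∧
  ∀ p ∈ adj.zipIdx, (p.2 : Int) < n →
    (∀ j ∈ p.1, (p.2 : Int) < j → j < n) ∧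
    (p.1.filter (fun j => decide ((p.2 : Int) < j))).Nodup
instance (n : Int) (adj : List (List Int)) : Decidable (Pre_build_simplices_py n adj) := by
  unfold Pre_build_simplices_py; infer_instance

def pvWitness_build_simplices_py : Int × List (List Int) := (3, [[1, 2], [0, 2], [0, 1]])

def Spec_build_simplices_py (n : Int) (adj : List (List Int)) (out : List (Int × List (List Int))) : Prop := out = build_simplices_py_alt n adj
instance (n : Int) (adj : List (List Int)) (out : List (Int × List (List Int))) : Decidable (Spec_build_simplices_py n adj out) := by unfold Spec_build_simplices_py; infer_instance

-- ===== CLAIM (what is proved, stated in full; the proofs are below) =====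
def Claim_equal_build_simplices_py : Prop := ∀ (n : Int) (adj : List (List Int)), Dom_build_simplices_py n adj → Pre_build_simplices_py n adj → Spec_build_simplices_py n adj (build_simplices_py n adj)

-- ===== LEMMAS AND PROOFS =====

-- canonical building blocks used by both directions of the proof
def pvRow (adj : List (List Int)) (i : Int) : List Int := PySem.List.pyGetD adj i []

def pvAS (adj : List (List Int)) (i : Int) : PySem.Set Int := PySem.Set.ofList (pvRow adj i)

def pvG (adj : List (List Int)) (i : Int) : List Int :=
  PySem.List.sorted ((pvAS adj i).filter (fun w => decide (i < w))) (fun x => x) false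

def pvC2 (adj : List (List Int)) (i j : Int) : List Int :=
  (pvG adj j).filter (fun w => (pvG adj i).contains w)

def pvC3 (adj : List (List Int)) (i j k : Int) : List Int :=
  (pvG adj k).filter (fun w => (pvC2 adj i j).contains w)

def pvL0 (n : Int) : List (List Int) := (PySem.List.pyRange 0 n 1).map (fun v => [v])
def pvL1 (n : Int) (adj : List (List Int)) : List (List Int) :=
  (PySem.List.pyRange 0 n 1).flatMap (fun i => (pvG adj i).map (fun j => [i, j]))
def pvL2 (n : Int) (adj : List (List Int)) : List (List Int) :=
  (PySem.List.pyRange 0 n 1).flatMap (fun i => (pvG adj i).flatMap (fun j =>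
    (pvC2 adj i j).map (fun k => [i, j, k])))
def pvL3 (n : Int) (adj : List (List Int)) : List (List Int) :=
  (PySem.List.pyRange 0 n 1).flatMap (fun i => (pvG adj i).flatMap (fun j =>
    (pvC2 adj i j).flatMap (fun k => (pvC3 adj i j k).map (fun l => [i, j, k, l]))))


-- basic membership / nodup facts about the canonical blocks
theorem pvG_mem (adj : List (List Int)) (i w : Int) :
    w ∈ pvG adj i ↔ w ∈ pvRow adj i ∧ i < w := by
  simp [pvG, PySem.List.mem_sorted, List.mem_filter, PySem.Set.mem_ofList, pvAS]

theorem pvG_nodup (adj : List (List Int)) (i : Int) : (pvG adj i).Nodup := by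
  have h : ((pvAS adj i).filter (fun w => decide (i < w))).Nodup :=
    (PySem.Set.nodup_ofList (xs := pvRow adj i)).filter _
  unfold pvG
  exact ((PySem.List.sorted_perm ((pvAS adj i).filter (fun w => decide (i < w)))
    (fun x => x) false).symm.nodup h)

theorem pvC2_mem (adj : List (List Int)) (i j w : Int) :
    w ∈ pvC2 adj i j ↔ w ∈ pvG adj j ∧ w ∈ pvG adj i := by
  simp [pvC2, List.mem_filter]

theorem pvC2_nodup (adj : List (List Int)) (i j : Int) : (pvC2 adj i j).Nodup :=
  (pvG_nodup adj j).filter _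

theorem pvC3_mem (adj : List (List Int)) (i j k w : Int) :
    w ∈ pvC3 adj i j k ↔ w ∈ pvG adj k ∧ w ∈ pvC2 adj i j := by
  simp [pvC3, List.mem_filter]

theorem pvRow_eq_getElem (adj : List (List Int)) (i : Int) (h0 : 0 ≤ i)
    (h1 : i < (adj.length : Int)) : pvRow adj i = adj[i.toNat]'(by omega) := by
  rw [pvRow, PySem.List.pyGetD_eq_getElem adj [] h0 (by simpa [PySem.List.len_eq] using h1)]

theorem pvG_bound (n : Int) (adj : List (List Int)) (hpre : Pre_build_simplices_py n adj)
    (i : Int) (h0 : 0 ≤ i) (h1 : i < n) : ∀ j ∈ pvG adj i, i < j ∧ j < n := by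
  intro j hj
  obtain ⟨hrow, hij⟩ := (pvG_mem adj i j).mp hj
  refine ⟨hij, ?_⟩
  obtain ⟨hlen, hP⟩ := hpre
  have hilen : i < (adj.length : Int) := lt_of_lt_of_le h1 hlen
  have hrow' : j ∈ adj[i.toNat]'(by omega) := by
    rwa [pvRow_eq_getElem adj i h0 hilen] at hrow
  have hmem : (adj[i.toNat]'(by omega), i.toNat) ∈ adj.zipIdx :=
    List.mk_mem_zipIdx_iff_getElem?.mpr (by simp)
  have := (hP _ hmem (by simpa using (by omega : (i.toNat : Int) < n))).1 j hrow'
  exact this (by omega)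

theorem pvG_filter_nodup (n : Int) (adj : List (List Int))
    (hpre : Pre_build_simplices_py n adj) (i : Int) (h0 : 0 ≤ i) (h1 : i < n) :
    ((pvRow adj i).filter (fun j => decide (i < j))).Nodup := by
  obtain ⟨hlen, hP⟩ := hpre
  have hilen : i < (adj.length : Int) := lt_of_lt_of_le h1 hlen
  have hmem : (adj[i.toNat]'(by omega), i.toNat) ∈ adj.zipIdx :=
    List.mk_mem_zipIdx_iff_getElem?.mpr (by simp)
  have h := (hP _ hmem (by simpa using (by omega : (i.toNat : Int) < n))).2
  rw [pvRow_eq_getElem adj i h0 hilen]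
  simpa [Int.toNat_of_nonneg h0] using h

-- pvExtend characterisation, level by level
theorem pvExtend_c4 (fwd : List (List Int)) (fuel : Nat) (i j k l : Int) (c : List Int)
    (acc : List (List Int) × List (List Int) × List (List Int) × List (List Int)) :
    pvExtend fwd fuel [i, j, k, l] c acc =
      (acc.1, acc.2.1, acc.2.2.1, acc.2.2.2 ++ [[i, j, k, l]]) := by
  cases fuel <;> (rw [pvExtend]; simp [pvPush])

def pvF (fwd : List (List Int)) (c : List Int) (v : Int) : List Int :=
  (PySem.List.pyGetD fwd v []).filter (fun w => PySem.Set.contains (PySem.Set.ofList c) w)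

theorem pvFold4 (fwd : List (List Int)) (i j k : Int) (F : Int → List Int) (c' : List Int)
    (acc : List (List Int) × List (List Int) × List (List Int) × List (List Int)) :
    c'.foldl (fun a v => pvExtend fwd 0 ([i, j, k] ++ [v]) (F v) a) acc =
      (acc.1, acc.2.1, acc.2.2.1, acc.2.2.2 ++ c'.map (fun v => [i, j, k, v])) := by
  induction c' generalizing acc with
  | nil => simp
  | cons v t ih =>
    rw [List.foldl_cons, ih, show ([i, j, k] ++ [v] : List Int) = [i, j, k, v] from rfl,
      pvExtend_c4]
    simp

theorem pvExtend_c3 (fwd : List (List Int)) (i j k : Int) (c : List Int)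
    (acc : List (List Int) × List (List Int) × List (List Int) × List (List Int)) :
    pvExtend fwd 1 [i, j, k] c acc =
      (acc.1, acc.2.1, acc.2.2.1 ++ [[i, j, k]],
       acc.2.2.2 ++ c.map (fun v => [i, j, k, v])) := by
  rw [pvExtend]
  simp only [List.length_cons, List.length_nil]
  rw [if_neg (by decide)]
  rw [pvFold4]
  simp [pvPush]

theorem pvFold3 (fwd : List (List Int)) (i j : Int) (F : Int → List Int) (c' : List Int)
    (acc : List (List Int) × List (List Int) × List (List Int) × List (List Int)) :
    c'.foldl (fun a v => pvExtend fwd 1 ([i, j] ++ [v]) (F v) a) acc =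
      (acc.1, acc.2.1, acc.2.2.1 ++ c'.map (fun k => [i, j, k]),
       acc.2.2.2 ++ c'.flatMap (fun k => (F k).map (fun l => [i, j, k, l]))) := by
  induction c' generalizing acc with
  | nil => simp
  | cons v t ih =>
    rw [List.foldl_cons, ih, show ([i, j] ++ [v] : List Int) = [i, j, v] from rfl,
      pvExtend_c3]
    simp

theorem pvExtend_c2 (fwd : List (List Int)) (i j : Int) (c : List Int)
    (acc : List (List Int) × List (List Int) × List (List Int) × List (List Int)) :
    pvExtend fwd 2 [i, j] c acc =
      (acc.1, acc.2.1 ++ [[i, j]], acc.2.2.1 ++ c.map (fun k => [i, j, k]),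
       acc.2.2.2 ++ c.flatMap (fun k => (pvF fwd c k).map (fun l => [i, j, k, l]))) := by
  rw [pvExtend]
  simp only [List.length_cons, List.length_nil]
  rw [if_neg (by decide)]
  rw [pvFold3 fwd i j (fun v =>
    (PySem.List.pyGetD fwd v []).filter (fun w => PySem.Set.contains (PySem.Set.ofList c) w))]
  simp [pvPush, pvF]

theorem pvFold2 (fwd : List (List Int)) (i : Int) (F : Int → List Int) (c' : List Int)
    (acc : List (List Int) × List (List Int) × List (List Int) × List (List Int)) :
    c'.foldl (fun a v => pvExtend fwd 2 ([i] ++ [v]) (F v) a) acc =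
      (acc.1, acc.2.1 ++ c'.map (fun j => [i, j]),
       acc.2.2.1 ++ c'.flatMap (fun j => (F j).map (fun k => [i, j, k])),
       acc.2.2.2 ++ c'.flatMap (fun j => (F j).flatMap (fun k =>
         (pvF fwd (F j) k).map (fun l => [i, j, k, l])))) := by
  induction c' generalizing acc with
  | nil => simp
  | cons v t ih =>
    rw [List.foldl_cons, ih, show ([i] ++ [v] : List Int) = [i, v] from rfl, pvExtend_c2]
    simp

theorem pvExtend_c1 (fwd : List (List Int)) (i : Int) (c : List Int)
    (acc : List (List Int) × List (List Int) × List (List Int) × List (List Int)) :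
    pvExtend fwd 3 [i] c acc =
      (acc.1 ++ [[i]], acc.2.1 ++ c.map (fun j => [i, j]),
       acc.2.2.1 ++ c.flatMap (fun j => (pvF fwd c j).map (fun k => [i, j, k])),
       acc.2.2.2 ++ c.flatMap (fun j => (pvF fwd c j).flatMap (fun k =>
         (pvF fwd (pvF fwd c j) k).map (fun l => [i, j, k, l])))) := by
  rw [pvExtend]
  simp only [List.length_cons, List.length_nil]
  rw [if_neg (by decide)]
  rw [pvFold2 fwd i (fun v =>
    (PySem.List.pyGetD fwd v []).filter (fun w => PySem.Set.contains (PySem.Set.ofList c) w))]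
  simp [pvPush, pvF]

theorem pvSeed (fwd : List (List Int)) (F : Int → List Int) (rng : List Int)
    (acc : List (List Int) × List (List Int) × List (List Int) × List (List Int)) :
    rng.foldl (fun a v => pvExtend fwd 3 [v] (F v) a) acc =
      (acc.1 ++ rng.map (fun v => [v]),
       acc.2.1 ++ rng.flatMap (fun i => (F i).map (fun j => [i, j])),
       acc.2.2.1 ++ rng.flatMap (fun i => (F i).flatMap (fun j =>
         (pvF fwd (F i) j).map (fun k => [i, j, k]))),
       acc.2.2.2 ++ rng.flatMap (fun i => (F i).flatMap (fun j =>
         (pvF fwd (F i) j).flatMap (fun k =>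
           (pvF fwd (pvF fwd (F i) j) k).map (fun l => [i, j, k, l]))))) := by
  induction rng generalizing acc with
  | nil => simp
  | cons v t ih =>
    rw [List.foldl_cons, ih, pvExtend_c1]
    simp


-- the forward-neighbour table B builds (identical to the let-bound `fwd` in the port)
def pvFwdList (n : Int) (adj : List (List Int)) : List (List Int) :=
  (PySem.List.pyRange 0 n 1).map (fun i =>
    PySem.List.sorted
      ((PySem.List.pyGetD
          ((PySem.List.pyRange 0 n 1).map (fun i => PySem.Set.ofList (PySem.List.pyGetD adj i [])))
          i []).filter (fun w => decide (i < w)))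
      (fun x => x) false)

theorem pvFwdList_get (n : Int) (adj : List (List Int)) (v : Int) (h0 : 0 ≤ v) (h1 : v < n) :
    PySem.List.pyGetD (pvFwdList n adj) v [] = pvG adj v := by
  unfold pvFwdList
  rw [PySem.List.pyGetD_map_pyRange_of_nonneg _ n v [] h0 h1,
    PySem.List.pyGetD_map_pyRange_of_nonneg _ n v [] h0 h1]
  rfl

theorem pvF_c2 (n : Int) (adj : List (List Int)) (hpre : Pre_build_simplices_py n adj)
    (i j : Int) (h0 : 0 ≤ i) (h1 : i < n) (hj : j ∈ pvG adj i) :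
    pvF (pvFwdList n adj) (pvG adj i) j = pvC2 adj i j := by
  obtain ⟨hij, hjn⟩ := pvG_bound n adj hpre i h0 h1 j hj
  rw [pvF, pvFwdList_get n adj j (by omega) hjn,
    PySem.Set.ofList_eq_self_of_nodup _ (pvG_nodup adj i)]
  rfl

theorem pvF_c3 (n : Int) (adj : List (List Int)) (hpre : Pre_build_simplices_py n adj)
    (i j k : Int) (h0 : 0 ≤ i) (h1 : i < n) (hj : j ∈ pvG adj i) (hk : k ∈ pvC2 adj i j) :
    pvF (pvFwdList n adj) (pvC2 adj i j) k = pvC3 adj i j k := by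
  obtain ⟨hij, hjn⟩ := pvG_bound n adj hpre i h0 h1 j hj
  have hkj := pvG_bound n adj hpre j (by omega) hjn k ((pvC2_mem adj i j k).mp hk).1
  rw [pvF, pvFwdList_get n adj k (by omega) hkj.2,
    PySem.Set.ofList_eq_self_of_nodup _ (pvC2_nodup adj i j)]
  rfl

theorem pv_altSeed (n : Int) (adj : List (List Int)) :
    build_simplices_py_alt n adj =
      [(0, ((PySem.List.pyRange 0 n 1).foldl (fun a v => pvExtend (pvFwdList n adj) 3 [v]
              (PySem.List.pyGetD (pvFwdList n adj) v []) a) ([], [], [], [])).1),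
       (1, ((PySem.List.pyRange 0 n 1).foldl (fun a v => pvExtend (pvFwdList n adj) 3 [v]
              (PySem.List.pyGetD (pvFwdList n adj) v []) a) ([], [], [], [])).2.1),
       (2, ((PySem.List.pyRange 0 n 1).foldl (fun a v => pvExtend (pvFwdList n adj) 3 [v]
              (PySem.List.pyGetD (pvFwdList n adj) v []) a) ([], [], [], [])).2.2.1),
       (3, ((PySem.List.pyRange 0 n 1).foldl (fun a v => pvExtend (pvFwdList n adj) 3 [v]
              (PySem.List.pyGetD (pvFwdList n adj) v []) a) ([], [], [], [])).2.2.2)] := rfl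


theorem pvB1 (n : Int) (adj : List (List Int)) :
    List.flatMap (fun i => List.map (fun j => [i, j]) (PySem.List.pyGetD (pvFwdList n adj) i []))
      (PySem.List.pyRange 0 n 1) = pvL1 n adj := by
  apply List.flatMap_congr
  intro i hi
  obtain ⟨h0, h1⟩ := PySem.List.mem_pyRange_one.mp hi
  rw [pvFwdList_get n adj i h0 h1]

theorem pvB2 (n : Int) (adj : List (List Int)) (hpre : Pre_build_simplices_py n adj) :
    List.flatMap (fun i => List.flatMap (fun j => List.map (fun k => [i, j, k])
        (pvF (pvFwdList n adj) (PySem.List.pyGetD (pvFwdList n adj) i []) j))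
        (PySem.List.pyGetD (pvFwdList n adj) i []))
      (PySem.List.pyRange 0 n 1) = pvL2 n adj := by
  apply List.flatMap_congr
  intro i hi
  obtain ⟨h0, h1⟩ := PySem.List.mem_pyRange_one.mp hi
  rw [pvFwdList_get n adj i h0 h1]
  apply List.flatMap_congr
  intro j hj
  rw [pvF_c2 n adj hpre i j h0 h1 hj]

theorem pvB3 (n : Int) (adj : List (List Int)) (hpre : Pre_build_simplices_py n adj) :
    List.flatMap (fun i => List.flatMap (fun j => List.flatMap (fun k => List.map (fun l => [i, j, k, l])
        (pvF (pvFwdList n adj) (pvF (pvFwdList n adj) (PySem.List.pyGetD (pvFwdList n adj) i []) j) k))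
        (pvF (pvFwdList n adj) (PySem.List.pyGetD (pvFwdList n adj) i []) j))
        (PySem.List.pyGetD (pvFwdList n adj) i []))
      (PySem.List.pyRange 0 n 1) = pvL3 n adj := by
  apply List.flatMap_congr
  intro i hi
  obtain ⟨h0, h1⟩ := PySem.List.mem_pyRange_one.mp hi
  rw [pvFwdList_get n adj i h0 h1]
  apply List.flatMap_congr
  intro j hj
  rw [pvF_c2 n adj hpre i j h0 h1 hj]
  apply List.flatMap_congr
  intro k hk
  rw [pvF_c3 n adj hpre i j k h0 h1 hj hk]

theorem pv_altEq (n : Int) (adj : List (List Int)) (hpre : Pre_build_simplices_py n adj) :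
    build_simplices_py_alt n adj =
      [(0, pvL0 n), (1, pvL1 n adj), (2, pvL2 n adj), (3, pvL3 n adj)] := by
  rw [pv_altSeed, pvSeed (pvFwdList n adj) (fun v => PySem.List.pyGetD (pvFwdList n adj) v []),
    pvB1 n adj, pvB2 n adj hpre, pvB3 n adj hpre]
  rfl


-- ===== A-side: canonicalising the four generation loops =====
def pvAdjSetList (n : Int) (adj : List (List Int)) : List (PySem.Set Int) :=
  (PySem.List.pyRange 0 n 1).map (fun i => PySem.Set.ofList (PySem.List.pyGetD adj i []))

def pvEdgesA (n : Int) (adj : List (List Int)) : List (List Int) :=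
  (PySem.List.pyRange 0 n 1).foldl (fun acc i =>
    (PySem.List.pyGetD adj i []).foldl (fun acc j =>
      if j > i then acc ++ [[i, j]] else acc) acc) []

def pvTriA (n : Int) (adj : List (List Int)) : List (List Int) :=
  (PySem.List.pyRange 0 n 1).foldl (fun acc i =>
    (PySem.List.pyGetD adj i []).foldl (fun acc j =>
      if j ≤ i then acc
      else (PySem.List.pyGetD adj j []).foldl (fun acc k =>
        if k ≤ j then acc
        else if PySem.Set.contains (PySem.List.pyGetD (pvAdjSetList n adj) i []) k then acc ++ [[i, j, k]]
        else acc) acc) acc) []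

def pvTetA (n : Int) (adj : List (List Int)) : List (List Int) :=
  (PySem.List.pyRange 0 n 1).foldl (fun acc i =>
    (PySem.List.pyGetD adj i []).foldl (fun acc j =>
      if j ≤ i then acc
      else
        let common := PySem.Set.inter (PySem.List.pyGetD (pvAdjSetList n adj) i []) (PySem.List.pyGetD (pvAdjSetList n adj) j [])
        common.foldl (fun acc k =>
          if k ≤ j then acc
          else (PySem.Set.inter common (PySem.List.pyGetD (pvAdjSetList n adj) k [])).foldl (fun acc l =>
            if l ≤ k then acc else acc ++ [[i, j, k, l]]) acc) acc) acc) []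

theorem pvASeed (n : Int) (adj : List (List Int)) :
    build_simplices_py n adj =
      [(0, (PySem.List.pyRange 0 n 1).map (fun v => [v])),
       (1, PySem.List.sorted (pvEdgesA n adj) (fun x => x) false),
       (2, PySem.List.sorted (pvTriA n adj) (fun x => x) false),
       (3, PySem.List.sorted (pvTetA n adj) (fun x => x) false)] := rfl

-- generic loop shapes: a 'continue' guard in front of an extending body
theorem pvFoldSkip {α : Type} (P : Int → Prop) [DecidablePred P] (F : Int → List α)
    (l : List Int) (acc : List α) :
    l.foldl (fun acc x => if P x then acc else acc ++ F x) acc =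
      acc ++ l.flatMap (fun x => if P x then [] else F x) := by
  rw [PySem.List.foldl_congr_mem l _ (fun acc x => acc ++ if P x then [] else F x) acc
    (by intro acc x _; by_cases h : P x <;> simp [h])]
  exact PySem.List.foldl_append_eq_flatMap _ _ _

theorem pvAS_get (n : Int) (adj : List (List Int)) (i : Int) (h0 : 0 ≤ i) (h1 : i < n) :
    PySem.List.pyGetD (pvAdjSetList n adj) i [] = pvAS adj i := by
  unfold pvAdjSetList
  rw [PySem.List.pyGetD_map_pyRange_of_nonneg _ n i [] h0 h1]
  rfl


def pvERaw (n : Int) (adj : List (List Int)) : List (List Int) :=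
  (PySem.List.pyRange 0 n 1).flatMap (fun i =>
    ((pvRow adj i).filter (fun j => decide (i < j))).map (fun j => [i, j]))

def pvTRaw (n : Int) (adj : List (List Int)) : List (List Int) :=
  (PySem.List.pyRange 0 n 1).flatMap (fun i =>
    (pvRow adj i).flatMap (fun j =>
      if j ≤ i then []
      else ((pvRow adj j).filter (fun k => decide (j < k) && (pvAS adj i).contains k)).map
        (fun k => [i, j, k])))

def pvQRaw (n : Int) (adj : List (List Int)) : List (List Int) :=
  (PySem.List.pyRange 0 n 1).flatMap (fun i =>
    (pvRow adj i).flatMap (fun j =>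
      if j ≤ i then []
      else (PySem.Set.inter (pvAS adj i) (pvAS adj j)).flatMap (fun k =>
        if k ≤ j then []
        else (PySem.Set.inter (PySem.Set.inter (pvAS adj i) (pvAS adj j)) (pvAS adj k)).flatMap
          (fun l => if l ≤ k then [] else [[i, j, k, l]]))))

theorem pvEdgesA_eq (n : Int) (adj : List (List Int)) :
    pvEdgesA n adj = pvERaw n adj := by
  unfold pvEdgesA pvERaw
  rw [PySem.List.foldl_congr_mem _ _ (fun acc i =>
    acc ++ ((pvRow adj i).filter (fun j => decide (i < j))).map (fun j => [i, j])) _ ?_]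
  · exact PySem.List.foldl_append_eq_flatMap _ _ _
  · intro acc i _
    rw [show (PySem.List.pyGetD adj i []) = pvRow adj i from rfl]
    rw [PySem.List.foldl_congr_mem _ _ (fun acc j =>
      if decide (i < j) = true then acc ++ [[i, j]] else acc) acc
      (by intro acc j _; simp)]
    exact PySem.List.foldl_append_if _ _ _ _

theorem pvTriA_eq (n : Int) (adj : List (List Int)) :
    pvTriA n adj = pvTRaw n adj := by
  unfold pvTriA pvTRaw
  rw [PySem.List.foldl_congr_mem _ _ (fun acc i =>
    acc ++ (pvRow adj i).flatMap (fun j =>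
      if j ≤ i then []
      else ((pvRow adj j).filter (fun k => decide (j < k) && (pvAS adj i).contains k)).map
        (fun k => [i, j, k]))) _ ?_]
  · exact PySem.List.foldl_append_eq_flatMap _ _ _
  · intro acc i hi
    obtain ⟨h0, h1⟩ := PySem.List.mem_pyRange_one.mp hi
    rw [show (PySem.List.pyGetD adj i []) = pvRow adj i from rfl]
    beta_reduce
    rw [← pvFoldSkip (fun j => j ≤ i) (fun j =>
      List.map (fun k => [i, j, k])
        (List.filter (fun k => decide (j < k) && (pvAS adj i).contains k) (pvRow adj j)))
      (pvRow adj i) acc]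
    apply PySem.List.foldl_congr_mem
    intro acc j _
    beta_reduce
    by_cases hj : j ≤ i
    · simp [hj]
    · rw [if_neg hj, if_neg hj]
      rw [show (PySem.List.pyGetD adj j []) = pvRow adj j from rfl]
      rw [PySem.List.foldl_congr_mem _ _ (fun acc k =>
        if (decide (j < k) && (pvAS adj i).contains k) = true then acc ++ [[i, j, k]] else acc) acc
        ?_]
      · exact PySem.List.foldl_append_if _ _ _ _
      · intro acc k _
        rw [pvAS_get n adj i h0 h1]
        by_cases hk : k ≤ j
        · simp [hk, show ¬ (j < k) by omega]
        · simp only [if_neg hk, show decide (j < k) = true by simp; omega, Bool.true_and]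

theorem pvTetA_eq (n : Int) (adj : List (List Int)) (hpre : Pre_build_simplices_py n adj) :
    pvTetA n adj = pvQRaw n adj := by
  unfold pvTetA pvQRaw
  rw [PySem.List.foldl_congr_mem _ _ (fun acc i =>
    acc ++ (pvRow adj i).flatMap (fun j =>
      if j ≤ i then []
      else (PySem.Set.inter (pvAS adj i) (pvAS adj j)).flatMap (fun k =>
        if k ≤ j then []
        else (PySem.Set.inter (PySem.Set.inter (pvAS adj i) (pvAS adj j)) (pvAS adj k)).flatMap
          (fun l => if l ≤ k then [] else [[i, j, k, l]])))) _ ?_]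
  · exact PySem.List.foldl_append_eq_flatMap _ _ _
  · intro acc i hi
    obtain ⟨h0, h1⟩ := PySem.List.mem_pyRange_one.mp hi
    rw [show (PySem.List.pyGetD adj i []) = pvRow adj i from rfl]
    beta_reduce
    rw [← pvFoldSkip (fun j => j ≤ i) (fun j =>
      (PySem.Set.inter (pvAS adj i) (pvAS adj j)).flatMap (fun k =>
        if k ≤ j then []
        else (PySem.Set.inter (PySem.Set.inter (pvAS adj i) (pvAS adj j)) (pvAS adj k)).flatMap
          (fun l => if l ≤ k then [] else [[i, j, k, l]])))
      (pvRow adj i) acc]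
    apply PySem.List.foldl_congr_mem
    intro acc j hjrow
    beta_reduce
    by_cases hj : j ≤ i
    · simp [hj]
    · rw [if_neg hj, if_neg hj]
      have hjn : j < n := (pvG_bound n adj hpre i h0 h1 j
        ((pvG_mem adj i j).mpr ⟨hjrow, by omega⟩)).2
      rw [pvAS_get n adj i h0 h1, pvAS_get n adj j (by omega) hjn]
      rw [← pvFoldSkip (fun k => k ≤ j) (fun k =>
        (PySem.Set.inter (PySem.Set.inter (pvAS adj i) (pvAS adj j)) (pvAS adj k)).flatMap
          (fun l => if l ≤ k then [] else [[i, j, k, l]]))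
        (PySem.Set.inter (pvAS adj i) (pvAS adj j)) acc]
      apply PySem.List.foldl_congr_mem
      intro acc k hkc
      beta_reduce
      by_cases hk : k ≤ j
      · simp [hk]
      · rw [if_neg hk, if_neg hk]
        have hki : k ∈ pvRow adj i := by
          have := (PySem.Set.mem_inter _ _ _).mp hkc
          simpa [pvAS, PySem.Set.mem_ofList] using this.1
        have hkn : k < n := (pvG_bound n adj hpre i h0 h1 k
          ((pvG_mem adj i k).mpr ⟨hki, by omega⟩)).2
        rw [pvAS_get n adj k (by omega) hkn]
        rw [← pvFoldSkip (fun l => l ≤ k) (fun l => [[i, j, k, l]])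
          (PySem.Set.inter (PySem.Set.inter (pvAS adj i) (pvAS adj j)) (pvAS adj k)) acc]


-- strict lexicographic order of the canonical lists
theorem pvG_pairwise (adj : List (List Int)) (i : Int) : (pvG adj i).Pairwise (· < ·) := by
  have h1 := PySem.List.sorted_pairwise ((pvAS adj i).filter (fun w => decide (i < w))) (fun x => x)
  have h2 : (pvG adj i).Pairwise (· ≠ ·) := pvG_nodup adj i
  have h1' : (pvG adj i).Pairwise (· ≤ ·) := h1
  exact (h1'.and h2).imp (fun h => lt_of_le_of_ne h.1 h.2)

theorem pvC2_pairwise (adj : List (List Int)) (i j : Int) : (pvC2 adj i j).Pairwise (· < ·) :=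
  List.Pairwise.sublist (List.filter_sublist) (pvG_pairwise adj j)

theorem pvC3_pairwise (adj : List (List Int)) (i j k : Int) : (pvC3 adj i j k).Pairwise (· < ·) :=
  List.Pairwise.sublist (List.filter_sublist) (pvG_pairwise adj k)

theorem pvL1_pairwise (n : Int) (adj : List (List Int)) :
    (pvL1 n adj).Pairwise (fun a b => a < b) := by
  rw [pvL1, List.pairwise_flatMap]
  refine ⟨?_, ?_⟩
  · intro i _
    rw [List.pairwise_map]
    exact (pvG_pairwise adj i).imp (fun h => by simp [List.cons_lt_cons_iff, h])
  · refine (PySem.List.pairwise_lt_pyRange_one 0 n).imp ?_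
    intro a b hab x hx y hy
    simp only [List.mem_map] at hx hy
    obtain ⟨j, _, rfl⟩ := hx; obtain ⟨k, _, rfl⟩ := hy
    simp [List.cons_lt_cons_iff, hab]

theorem pvL2_pairwise (n : Int) (adj : List (List Int)) :
    (pvL2 n adj).Pairwise (fun a b => a < b) := by
  rw [pvL2, List.pairwise_flatMap]
  refine ⟨?_, ?_⟩
  · intro i _
    rw [List.pairwise_flatMap]
    refine ⟨?_, ?_⟩
    · intro j _
      rw [List.pairwise_map]
      exact (pvC2_pairwise adj i j).imp (fun h => by simp [List.cons_lt_cons_iff, h])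
    · refine (pvG_pairwise adj i).imp ?_
      intro a b hab x hx y hy
      simp only [List.mem_map] at hx hy
      obtain ⟨k, _, rfl⟩ := hx; obtain ⟨l, _, rfl⟩ := hy
      simp [List.cons_lt_cons_iff, hab]
  · refine (PySem.List.pairwise_lt_pyRange_one 0 n).imp ?_
    intro a b hab x hx y hy
    simp only [List.mem_flatMap, List.mem_map] at hx hy
    obtain ⟨j, _, k, _, rfl⟩ := hx; obtain ⟨j', _, k', _, rfl⟩ := hy
    simp [List.cons_lt_cons_iff, hab]

theorem pvL3_pairwise (n : Int) (adj : List (List Int)) :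
    (pvL3 n adj).Pairwise (fun a b => a < b) := by
  rw [pvL3, List.pairwise_flatMap]
  refine ⟨?_, ?_⟩
  · intro i _
    rw [List.pairwise_flatMap]
    refine ⟨?_, ?_⟩
    · intro j _
      rw [List.pairwise_flatMap]
      refine ⟨?_, ?_⟩
      · intro k _
        rw [List.pairwise_map]
        exact (pvC3_pairwise adj i j k).imp (fun h => by simp [List.cons_lt_cons_iff, h])
      · refine (pvC2_pairwise adj i j).imp ?_
        intro a b hab x hx y hy
        simp only [List.mem_map] at hx hy
        obtain ⟨k, _, rfl⟩ := hx; obtain ⟨l, _, rfl⟩ := hy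
        simp [List.cons_lt_cons_iff, hab]
    · refine (pvG_pairwise adj i).imp ?_
      intro a b hab x hx y hy
      simp only [List.mem_flatMap, List.mem_map] at hx hy
      obtain ⟨k, _, l, _, rfl⟩ := hx; obtain ⟨k', _, l', _, rfl⟩ := hy
      simp [List.cons_lt_cons_iff, hab]
  · refine (PySem.List.pairwise_lt_pyRange_one 0 n).imp ?_
    intro a b hab x hx y hy
    simp only [List.mem_flatMap, List.mem_map] at hx hy
    obtain ⟨j, _, k, _, l, _, rfl⟩ := hx; obtain ⟨j', _, k', _, l', _, rfl⟩ := hy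
    simp [List.cons_lt_cons_iff, hab]

theorem pvL1_nodup (n : Int) (adj : List (List Int)) : (pvL1 n adj).Nodup :=
  (pvL1_pairwise n adj).imp (fun h => ne_of_lt h)
theorem pvL2_nodup (n : Int) (adj : List (List Int)) : (pvL2 n adj).Nodup :=
  (pvL2_pairwise n adj).imp (fun h => ne_of_lt h)
theorem pvL3_nodup (n : Int) (adj : List (List Int)) : (pvL3 n adj).Nodup :=
  (pvL3_pairwise n adj).imp (fun h => ne_of_lt h)

-- the raw generation lists carry no duplicates under Pre_
theorem pvFwdPairs (n : Int) (adj : List (List Int)) (hpre : Pre_build_simplices_py n adj)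
    (i : Int) (h0 : 0 ≤ i) (h1 : i < n) :
    (pvRow adj i).Pairwise (fun a b => i < a → i < b → a ≠ b) := by
  have := (pvG_filter_nodup n adj hpre i h0 h1)
  have h := List.pairwise_filter.mp this
  exact h.imp (fun hx ha hb => hx (by simpa using ha) (by simpa using hb))

theorem pvERaw_nodup (n : Int) (adj : List (List Int)) (hpre : Pre_build_simplices_py n adj) :
    (pvERaw n adj).Nodup := by
  rw [pvERaw, List.nodup_flatMap]
  refine ⟨?_, ?_⟩
  · intro i hi
    obtain ⟨h0, h1⟩ := PySem.List.mem_pyRange_one.mp hi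
    exact (pvG_filter_nodup n adj hpre i h0 h1).map (fun a b h => by simpa using h)
  · refine (PySem.List.pairwise_lt_pyRange_one 0 n).imp ?_
    intro a b hab x hx hy
    simp only [List.mem_map] at hx hy
    obtain ⟨j, _, rfl⟩ := hx
    obtain ⟨k, _, h⟩ := hy
    simp only [List.cons.injEq] at h
    omega

theorem pvTRaw_nodup (n : Int) (adj : List (List Int)) (hpre : Pre_build_simplices_py n adj) :
    (pvTRaw n adj).Nodup := by
  rw [pvTRaw, List.nodup_flatMap]
  refine ⟨?_, ?_⟩
  · intro i hi
    obtain ⟨h0, h1⟩ := PySem.List.mem_pyRange_one.mp hi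
    rw [List.nodup_flatMap]
    refine ⟨?_, ?_⟩
    · intro j hj
      by_cases hle : j ≤ i
      · simp [hle]
      · rw [if_neg hle]
        have hjn : j < n := (pvG_bound n adj hpre i h0 h1 j
          ((pvG_mem adj i j).mpr ⟨hj, by omega⟩)).2
        have hnd : ((pvRow adj j).filter (fun k => decide (j < k) && (pvAS adj i).contains k)).Nodup := by
          rw [show (fun k => decide (j < k) && (pvAS adj i).contains k)
              = (fun k => (pvAS adj i).contains k && decide (j < k)) from
              funext (fun k => Bool.and_comm _ _), ← List.filter_filter]
          exact (pvG_filter_nodup n adj hpre j (by omega) hjn).filter _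
        exact hnd.map (fun a b h => by simpa using h)
    · refine (pvFwdPairs n adj hpre i h0 h1).imp ?_
      intro a b hab x hx hy
      beta_reduce at hx hy
      by_cases ha : a ≤ i
      · simp [ha] at hx
      · by_cases hb : b ≤ i
        · simp [hb] at hy
        · rw [if_neg ha] at hx; rw [if_neg hb] at hy
          simp only [List.mem_map] at hx hy
          obtain ⟨k, _, rfl⟩ := hx
          obtain ⟨k', _, h⟩ := hy
          simp only [List.cons.injEq] at h
          exact hab (by omega) (by omega) (by omega)
  · refine (PySem.List.pairwise_lt_pyRange_one 0 n).imp ?_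
    intro a b hab x hx hy
    simp only [List.mem_flatMap] at hx hy
    obtain ⟨j, _, hx⟩ := hx
    obtain ⟨j', _, hy⟩ := hy
    rw [List.mem_ite_nil_left] at hx hy
    simp only [List.mem_map] at hx hy
    obtain ⟨_, k, _, rfl⟩ := hx
    obtain ⟨_, k', _, h⟩ := hy
    simp only [List.cons.injEq] at h
    omega

theorem pvQRaw_nodup (n : Int) (adj : List (List Int)) (hpre : Pre_build_simplices_py n adj) :
    (pvQRaw n adj).Nodup := by
  rw [pvQRaw, List.nodup_flatMap]
  refine ⟨?_, ?_⟩
  · intro i hi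
    obtain ⟨h0, h1⟩ := PySem.List.mem_pyRange_one.mp hi
    rw [List.nodup_flatMap]
    refine ⟨?_, ?_⟩
    · intro j _
      by_cases hle : j ≤ i
      · simp [hle]
      · rw [if_neg hle, List.nodup_flatMap]
        refine ⟨?_, ?_⟩
        · intro k _
          by_cases hk : k ≤ j
          · simp [hk]
          · rw [if_neg hk, List.nodup_flatMap]
            refine ⟨?_, ?_⟩
            · intro l _
              by_cases hl : l ≤ k <;> simp [hl]
            · have hnd : (PySem.Set.inter (PySem.Set.inter (pvAS adj i) (pvAS adj j)) (pvAS adj k)).Nodup :=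
                PySem.Set.nodup_inter _ _ (PySem.Set.nodup_inter _ _ (PySem.Set.nodup_ofList _))
              refine hnd.imp ?_
              intro a b hab x hx hy
              rw [List.mem_ite_nil_left] at hx hy
              obtain ⟨_, hx⟩ := hx; obtain ⟨_, hy⟩ := hy
              simp only [List.mem_singleton] at hx hy
              subst hx
              simp only [List.cons.injEq] at hy
              omega
        · have hnd : (PySem.Set.inter (pvAS adj i) (pvAS adj j)).Nodup :=
            PySem.Set.nodup_inter _ _ (PySem.Set.nodup_ofList _)
          refine hnd.imp ?_
          intro a b hab x hx hy
          rw [List.mem_ite_nil_left] at hx hy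
          obtain ⟨_, hx⟩ := hx; obtain ⟨_, hy⟩ := hy
          simp only [List.mem_flatMap] at hx hy
          obtain ⟨l, _, hx⟩ := hx; obtain ⟨l', _, hy⟩ := hy
          rw [List.mem_ite_nil_left] at hx hy
          simp only [List.mem_singleton] at hx hy
          obtain ⟨_, rfl⟩ := hx
          obtain ⟨_, h⟩ := hy
          simp only [List.cons.injEq] at h
          omega
    · refine (pvFwdPairs n adj hpre i h0 h1).imp ?_
      intro a b hab x hx hy
      beta_reduce at hx hy
      by_cases ha : a ≤ i
      · simp [ha] at hx
      · by_cases hb : b ≤ i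
        · simp [hb] at hy
        · rw [if_neg ha] at hx; rw [if_neg hb] at hy
          simp only [List.mem_flatMap] at hx hy
          obtain ⟨k, _, hx⟩ := hx; obtain ⟨k', _, hy⟩ := hy
          rw [List.mem_ite_nil_left] at hx hy
          obtain ⟨_, hx⟩ := hx; obtain ⟨_, hy⟩ := hy
          simp only [List.mem_flatMap] at hx hy
          obtain ⟨l, _, hx⟩ := hx; obtain ⟨l', _, hy⟩ := hy
          rw [List.mem_ite_nil_left] at hx hy
          simp only [List.mem_singleton] at hx hy
          obtain ⟨_, rfl⟩ := hx
          obtain ⟨_, h⟩ := hy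
          simp only [List.cons.injEq] at h
          exact hab (by omega) (by omega) (by omega)
  · refine (PySem.List.pairwise_lt_pyRange_one 0 n).imp ?_
    intro a b hab x hx hy
    simp only [List.mem_flatMap] at hx hy
    obtain ⟨j, _, hx⟩ := hx; obtain ⟨j', _, hy⟩ := hy
    rw [List.mem_ite_nil_left] at hx hy
    obtain ⟨_, hx⟩ := hx; obtain ⟨_, hy⟩ := hy
    simp only [List.mem_flatMap] at hx hy
    obtain ⟨k, _, hx⟩ := hx; obtain ⟨k', _, hy⟩ := hy
    rw [List.mem_ite_nil_left] at hx hy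
    obtain ⟨_, hx⟩ := hx; obtain ⟨_, hy⟩ := hy
    simp only [List.mem_flatMap] at hx hy
    obtain ⟨l, _, hx⟩ := hx; obtain ⟨l', _, hy⟩ := hy
    rw [List.mem_ite_nil_left] at hx hy
    simp only [List.mem_singleton] at hx hy
    obtain ⟨_, rfl⟩ := hx
    obtain ⟨_, h⟩ := hy
    simp only [List.cons.injEq] at h
    omega

-- same members, hence (both lists being duplicate-free) a permutation, hence equal sorted lists

theorem pvSorted_eq (xs ys : List (List Int)) (hperm : ys.Perm xs)
    (hpair : ys.Pairwise (fun a b => a < b)) :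
    @PySem.List.sorted (List Int) (List Int) List.instLT (fun a b => a.decidableLT b)
      xs (fun x => x) false = ys := by
  have hinst : (fun (a b : List Int) => a.decidableLT b)
      = (@LinearOrder.toDecidableLT _ List.instLinearOrder) :=
    funext (fun a => funext (fun b => Subsingleton.elim _ _))
  rw [hinst]
  exact PySem.List.sorted_eq_of_perm_of_pairwise_lt xs ys (fun x => x) hperm hpair

theorem pvE_sorted (n : Int) (adj : List (List Int)) (hpre : Pre_build_simplices_py n adj) :
    PySem.List.sorted (pvERaw n adj) (fun x => x) false = pvL1 n adj := by
  apply pvSorted_eq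
  · refine (List.perm_ext_iff_of_nodup (pvL1_nodup n adj) (pvERaw_nodup n adj hpre)).2 ?_
    intro x
    simp [pvL1, pvERaw, pvG_mem, List.mem_flatMap, List.mem_map, List.mem_filter]
  · exact pvL1_pairwise n adj

theorem pvT_sorted (n : Int) (adj : List (List Int)) (hpre : Pre_build_simplices_py n adj) :
    PySem.List.sorted (pvTRaw n adj) (fun x => x) false = pvL2 n adj := by
  apply pvSorted_eq
  · refine (List.perm_ext_iff_of_nodup (pvL2_nodup n adj) (pvTRaw_nodup n adj hpre)).2 ?_
    intro x
    simp only [pvL2, pvTRaw, List.mem_flatMap, List.mem_map, List.mem_filter,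
      List.mem_ite_nil_left, pvC2_mem, pvG_mem, PySem.Set.contains_iff, pvAS,
      PySem.Set.mem_ofList, Bool.and_eq_true, decide_eq_true_eq, not_le]
    constructor
    · rintro ⟨i, hi, j, ⟨hj, hij⟩, k, ⟨⟨hk1, hjk⟩, hk2, _⟩, hx⟩
      exact ⟨i, hi, j, hj, hij, k, ⟨hk1, hjk, hk2⟩, hx⟩
    · rintro ⟨i, hi, j, hj, hij, k, ⟨hk1, hjk, hk2⟩, hx⟩
      exact ⟨i, hi, j, ⟨hj, hij⟩, k, ⟨⟨hk1, hjk⟩, hk2, by omega⟩, hx⟩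
  · exact pvL2_pairwise n adj

theorem pvQ_sorted (n : Int) (adj : List (List Int)) (hpre : Pre_build_simplices_py n adj) :
    PySem.List.sorted (pvQRaw n adj) (fun x => x) false = pvL3 n adj := by
  apply pvSorted_eq
  · refine (List.perm_ext_iff_of_nodup (pvL3_nodup n adj) (pvQRaw_nodup n adj hpre)).2 ?_
    intro x
    simp only [pvL3, pvQRaw, List.mem_flatMap, List.mem_map, List.mem_ite_nil_left,
      List.mem_singleton, pvC3_mem, pvC2_mem, pvG_mem,
      PySem.Set.mem_inter, pvAS, PySem.Set.mem_ofList, not_le]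
    constructor
    · rintro ⟨i, hi, j, ⟨hj, hij⟩, k, ⟨⟨hk1, hjk⟩, hk2, _⟩, l, ⟨⟨hl1, hkl⟩, ⟨hl2, _⟩, hl3, _⟩, hx⟩
      exact ⟨i, hi, j, hj, hij, k, ⟨hk2, hk1⟩, hjk, l, ⟨⟨hl3, hl2⟩, hl1⟩, hkl, hx.symm⟩
    · rintro ⟨i, hi, j, hj, hij, k, ⟨hk2, hk1⟩, hjk, l, ⟨⟨hl3, hl2⟩, hl1⟩, hkl, hx⟩
      exact ⟨i, hi, j, ⟨hj, hij⟩, k, ⟨⟨hk1, hjk⟩, hk2, by omega⟩, l,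
        ⟨⟨hl1, hkl⟩, ⟨hl2, by omega⟩, hl3, by omega⟩, hx.symm⟩
  · exact pvL3_pairwise n adj

theorem pv_aEq (n : Int) (adj : List (List Int)) (hpre : Pre_build_simplices_py n adj) :
    build_simplices_py n adj =
      [(0, pvL0 n), (1, pvL1 n adj), (2, pvL2 n adj), (3, pvL3 n adj)] := by
  rw [pvASeed, pvEdgesA_eq, pvTriA_eq, pvTetA_eq n adj hpre,
    pvE_sorted n adj hpre, pvT_sorted n adj hpre, pvQ_sorted n adj hpre]
  rfl

-- ===== VERDICT (by name: the statement is the Claim_ definition above) =====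
theorem build_simplices_py_spec : Claim_equal_build_simplices_py := by
  intro n adj _hdom hpre
  unfold Spec_build_simplices_py
  rw [pv_aEq n adj hpre, pv_altEq n adj hpre]
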